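-- pv_equiv track=rewrite | github.com/JasmineGonzalez10/anticipation | anticipation/tokenize.py | interarrival_to_arrival
-- ===== SOURCE A (Python) =====
-- def interarrival_to_arrival(control_tokens):
--     arrival_tokens = control_tokens[0::3]
--     firsts = arrival_tokens[1:]
--     lasts = arrival_tokens[:-1]
--     absolutes = []
--     for i in range(len(arrival_tokens) - 1):
--       sum = 0
--       for k in range(i):
--           sum += lasts[k]
--       absolute = firsts[i] + lasts[i] + sum
--       absolutes.append(absolute)
--     arrival_tokens[1:] = absolutes
--     arrival_tokens[0] = arrival_tokens[0]
--     control_tokens[0::3] = arrival_tokens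
--     return control_tokens
-- ===== SOURCE B (Python) =====
-- def interarrival_to_arrival(control_tokens):
--     # Single pass over 3-token chunks with a running prefix sum of the arrival
--     # tokens (A recomputes the sum of all earlier arrivals for every position).
--     # A mutates control_tokens in place; B returns a fresh, equal list.
--     out = []
--     total = 0
--     rest = control_tokens
--     while rest:
--         total += rest[0]
--         out.append(total)
--         out.extend(rest[1:3])
--         rest = rest[3:]
--     return out
-- ===== Notes on version B (the rewrite author's own statement) =====
-- stated objective: faster
-- what changed: Replaces the quadratic re-summation of all earlier arrival tokens (plus three slice passes and two slice assignments) by a single pass over 3-token chunks that carries a running prefix sum; B builds a new list instead of mutating the argument.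
import Mathlib
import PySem

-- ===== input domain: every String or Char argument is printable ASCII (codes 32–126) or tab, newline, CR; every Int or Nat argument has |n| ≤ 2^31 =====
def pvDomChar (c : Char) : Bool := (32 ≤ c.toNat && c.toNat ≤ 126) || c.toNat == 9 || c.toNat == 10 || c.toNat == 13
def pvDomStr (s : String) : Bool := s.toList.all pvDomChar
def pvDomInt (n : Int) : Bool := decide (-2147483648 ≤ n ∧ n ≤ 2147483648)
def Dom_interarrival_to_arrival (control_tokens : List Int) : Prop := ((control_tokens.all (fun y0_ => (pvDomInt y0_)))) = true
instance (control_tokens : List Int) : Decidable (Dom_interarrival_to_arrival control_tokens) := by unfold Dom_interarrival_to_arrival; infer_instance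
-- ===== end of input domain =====

-- B replaces A's quadratic re-summation by one linear pass with a running
-- prefix sum; A also mutates control_tokens in place while B returns a fresh
-- list, so the equivalence proved here is about the return value only.

-- ===== PORT A =====
-- hand port of the extended-slice assignment 'control_tokens[0::3] = vs'
-- (exact when vs has as many elements as the slice, which is the case here;
-- Python raises ValueError on a length mismatch)
def setStep3 : List Int → List Int → List Int
  | [], _ => []
  | xs, [] => xs
  | [_], v :: _ => [v]
  | [_, b], v :: _ => [v, b]
  | _ :: b :: c :: rest, v :: vs => v :: b :: c :: setStep3 rest vs

def interarrival_to_arrival (control_tokens : List Int) : List Int :=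
  -- arrival_tokens = control_tokens[0::3]  (step 3 ≠ 0, so slice? never returns none)
  let arrival_tokens := (PySem.List.slice? control_tokens (some 0) none 3).getD []
  let firsts := PySem.List.slice arrival_tokens (some 1) none
  let lasts := PySem.List.slice arrival_tokens none (some (-1))
  let absolutes := (PySem.List.pyRange 0 ((arrival_tokens.length : Int) - 1) 1).foldl
    (fun acc i =>
      let sum := (PySem.List.pyRange 0 i 1).foldl
        (fun s k => s + PySem.List.pyGetD lasts k 0) 0
      let absolute := PySem.List.pyGetD firsts i 0 + PySem.List.pyGetD lasts i 0 + sum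
      acc ++ [absolute]) []
  -- arrival_tokens[1:] = absolutes  (hand port: absolutes has exactly len-1 elements here)
  let arrival_tokens := PySem.List.slice arrival_tokens none (some 1) ++ absolutes
  -- arrival_tokens[0] = arrival_tokens[0]  (IndexError on []: excluded by Pre_)
  let arrival_tokens := PySem.List.pySetD arrival_tokens 0 (PySem.List.pyGetD arrival_tokens 0 0)
  -- control_tokens[0::3] = arrival_tokens; return control_tokens
  setStep3 control_tokens arrival_tokens

-- ===== PORT B =====
-- B's while loop: out/total are the accumulators, rest = rest[3:] each round
def altGo (out : List Int) (total : Int) : List Int → List Int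
  | [] => out
  | [x] => out ++ [total + x]
  | [x, y] => out ++ [total + x, y]
  | x :: y :: z :: rest => altGo (out ++ [total + x, y, z]) (total + x) rest

def interarrival_to_arrival_alt (control_tokens : List Int) : List Int :=
  altGo [] 0 control_tokens

-- ===== PRECONDITION & SPEC =====
-- A raises IndexError on the empty list (arrival_tokens[0] on []); nothing else raises.
def Pre_interarrival_to_arrival (control_tokens : List Int) : Prop := control_tokens ≠ []
instance (control_tokens : List Int) : Decidable (Pre_interarrival_to_arrival control_tokens) := by
  unfold Pre_interarrival_to_arrival; infer_instance
def pvWitness_interarrival_to_arrival : List Int := [1, 10, 20, 2, 30, 40]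

def Spec_interarrival_to_arrival (control_tokens : List Int) (out : List Int) : Prop :=
  out = interarrival_to_arrival_alt control_tokens
instance (control_tokens : List Int) (out : List Int) : Decidable (Spec_interarrival_to_arrival control_tokens out) := by
  unfold Spec_interarrival_to_arrival; infer_instance

-- ===== CLAIM (what is proved, stated in full; the proofs are below) =====
def Claim_equal_interarrival_to_arrival : Prop := ∀ (control_tokens : List Int), Dom_interarrival_to_arrival control_tokens → Pre_interarrival_to_arrival control_tokens → Spec_interarrival_to_arrival control_tokens (interarrival_to_arrival control_tokens)

-- ===== LEMMAS AND PROOFS =====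

-- the step-3 slice, recursively
def every3 : List Int → List Int
  | [] => []
  | [x] => [x]
  | [x, _] => [x]
  | x :: _ :: _ :: rest => x :: every3 rest

-- running prefix sums
def psum : Int → List Int → List Int
  | _, [] => []
  | t, x :: xs => (t + x) :: psum (t + x) xs

lemma slice3_cons (x y z : Int) (rest : List Int) :
    PySem.List.slice? (x :: y :: z :: rest) (some 0) none 3 =
      (PySem.List.slice? rest (some 0) none 3).map (x :: ·) := by
  simp only [PySem.List.slice?, PySem.List.sliceIndices]
  norm_num
  have hmin : min (0:Int) (↑rest.length + 1 + 1 + 1) = 0 := by omega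
  rw [hmin]
  have hc : ((↑rest.length + 1 + 1 + 1 - 0 + 3 - 1 : Int) / 3).toNat
      = ((↑rest.length + 3 - 1 : Int) / 3).toNat + 1 := by omega
  rw [hc]
  have hc2 : (if 0 < rest.length then ((↑rest.length + 3 - 1 : Int) / 3).toNat else 0)
      = ((↑rest.length + 3 - 1 : Int) / 3).toNat := by
    split_ifs with h
    · rfl
    · simp at h; subst h; decide
  have hif : (if (0:Int) ≤ ↑rest.length + 1 + 1 then ((↑rest.length + 3 - 1 : Int) / 3).toNat + 1 else 0)
      = ((↑rest.length + 3 - 1 : Int) / 3).toNat + 1 := by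
    split_ifs with h
    · rfl
    · omega
  rw [hc2, hif, List.range_succ_eq_map, List.filterMap_cons, List.filterMap_map]
  norm_num
  congr 1

lemma slice3_eq_every3 (xs : List Int) :
    PySem.List.slice? xs (some 0) none 3 = some (every3 xs) := by
  fun_induction every3 xs with
  | case1 => simp [PySem.List.slice?, PySem.List.sliceIndices]
  | case2 x => simp [PySem.List.slice?, PySem.List.sliceIndices]
  | case3 x y => simp [PySem.List.slice?, PySem.List.sliceIndices]
  | case4 x y z rest ih => rw [slice3_cons, ih]; simp

lemma altGo_eq (out : List Int) (t : Int) (xs : List Int) :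
    altGo out t xs = out ++ setStep3 xs (psum t (every3 xs)) := by
  fun_induction altGo out t xs with
  | case1 out t => simp [setStep3]
  | case2 out t x => simp [every3, psum, setStep3]
  | case3 out t x y => simp [every3, psum, setStep3]
  | case4 out t x y z rest ih => simp [every3, psum, setStep3, ih]

lemma sum_take_succ (L : List Int) (j : Nat) :
    (L.take (j + 1)).sum = (L.take j).sum + L.getD j 0 := by
  rw [List.take_add_one, List.sum_append]
  cases h : L[j]? <;> simp [List.getD, h]

lemma pvInnerSum (L : List Int) (j : Nat) :
    (PySem.List.pyRange 0 (j : Int) 1).foldl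
      (fun s k => s + PySem.List.pyGetD L k 0) 0 = (L.take j).sum := by
  induction j with
  | zero => simp
  | succ n ih =>
      have : ((n:Int) + 1) = ((n + 1 : Nat) : Int) := by push_cast; ring
      rw [← this, PySem.List.pyRange_one_succ_right (by positivity), List.foldl_append, ih,
        sum_take_succ]
      simp

lemma psum_eq_map (t : Int) (xs : List Int) :
    psum t xs = (List.range xs.length).map (fun j => t + (xs.take (j + 1)).sum) := by
  induction xs generalizing t with
  | nil => simp [psum]
  | cons x xs ih =>
      simp only [psum, List.length_cons, List.range_succ_eq_map, List.map_cons, List.map_map]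
      congr 1
      · simp
      · rw [ih]
        apply List.map_congr_left
        intro j hj
        simp [List.take_succ_cons]
        ring

-- A's middle section (the three slices, the quadratic loop and the two
-- assignments into arrival_tokens) computes the prefix sums of the arrival tokens
lemma arr2_eq (a : Int) (as : List Int) :
    PySem.List.slice (a :: as) none (some 1) ++
      (PySem.List.pyRange 0 (((a :: as).length : Int) - 1) 1).foldl
        (fun acc i =>
          acc ++ [PySem.List.pyGetD (PySem.List.slice (a :: as) (some 1) none) i 0 +
                  PySem.List.pyGetD (PySem.List.slice (a :: as) none (some (-1))) i 0 +
                  (PySem.List.pyRange 0 i 1).foldl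
                    (fun s k => s + PySem.List.pyGetD (PySem.List.slice (a :: as) none (some (-1))) k 0) 0]) []
    = psum 0 (a :: as) := by
  have hn : (((a :: as).length : Int) - 1) = ((as.length : Nat) : Int) := by
    simp
  rw [hn, PySem.List.slice_from_one, PySem.List.slice_to_neg_one,
    PySem.List.foldl_append_singleton_eq_map, PySem.List.pyRange_zero_nat,
    List.map_map, PySem.List.slice_to _ (by norm_num)]
  show (a :: as).take 1 ++ _ = _
  simp only [List.take_succ_cons, List.take_zero, List.singleton_append, psum, List.tail_cons]
  rw [psum_eq_map]
  congr 1
  · ring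
  apply List.map_congr_left
  intro j hj
  simp only [List.mem_range] at hj
  simp only [Function.comp_apply, PySem.List.pyGetD_natCast, pvInnerSum]
  have hdl : (a :: as).dropLast = (a :: as).take as.length := by
    rw [List.dropLast_eq_take]; simp
  have h1 : ((a :: as).dropLast).getD j 0 = (a :: as).getD j 0 := by
    rw [hdl]
    simp [List.getD, List.getElem?_take_of_lt hj]
  have h2 : ((a :: as).dropLast).take j = (a :: as).take j := by
    rw [hdl, List.take_take]
    congr 1
    omega
  rw [h1, h2]
  have h3 := sum_take_succ (a :: as) j
  have h4 := sum_take_succ as j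
  simp only [List.take_succ_cons] at h3
  rw [h4]
  have h5 : (a :: (as.take j)).sum = a + (as.take j).sum := by simp
  omega

lemma every3_ne_nil (ct : List Int) (h : ct ≠ []) : ∃ a as, every3 ct = a :: as := by
  match ct with
  | [] => exact absurd rfl h
  | [x] => exact ⟨x, [], rfl⟩
  | [x, y] => exact ⟨x, [], rfl⟩
  | x :: y :: z :: r => exact ⟨x, every3 r, rfl⟩

lemma A_eq (ct : List Int) (h : ct ≠ []) :
    interarrival_to_arrival ct = setStep3 ct (psum 0 (every3 ct)) := by
  obtain ⟨a, as, hrw⟩ := every3_ne_nil ct h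
  unfold interarrival_to_arrival
  rw [slice3_eq_every3, hrw]
  simp only [Option.getD_some]
  rw [arr2_eq]
  have hne : psum 0 (a :: as) = (0 + a) :: psum (0 + a) as := rfl
  rw [hne, PySem.List.pyGetD_zero_cons, PySem.List.pySetD_of_nonneg _ _ (by norm_num)]
  simp

-- ===== VERDICT (by name: the statement is the Claim_ definition above) =====
theorem interarrival_to_arrival_spec : Claim_equal_interarrival_to_arrival := by
  intro ct _ hpre
  unfold Spec_interarrival_to_arrival interarrival_to_arrival_alt
  rw [A_eq ct hpre, altGo_eq]
  simp
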